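-- pv_equiv track=rewrite | github.com/SamirElmasri/AI-CSMM.101x_Course | csp_def.py | peers_builder
-- ===== SOURCE A (Python) =====
-- def peers_builder(variable,utilities):
--
--     peers = {}
--     for i in range(len(variable)):
--         up = []
--         for l in range(len(utilities)):
--             for n in range(len(utilities[l])):
--                 if variable[i] in utilities[l][n]:
--                     up.append(utilities[l][n])
--         peers.update({variable[i] : up})
--
--     return peers
-- ===== SOURCE B (Python) =====
-- def peers_builder(variable, utilities):
--     # single pass over the units: append each unit to the lists of the variables it contains
--     peers = {v: [] for v in variable}
--     for group in utilities:
--         for unit in group: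
--             for v in dict.fromkeys(unit):
--                 if v in peers:
--                     peers[v].append(unit)
--     return peers
-- ===== Notes on version B (the rewrite author's own statement) =====
-- stated objective: faster
-- what changed: Instead of rescanning every unit once per variable (nested V×U loops with a membership test), B builds the dict of all variables once and makes a single pass over the units, appending each unit to the entry of every variable it contains.
import Mathlib
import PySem

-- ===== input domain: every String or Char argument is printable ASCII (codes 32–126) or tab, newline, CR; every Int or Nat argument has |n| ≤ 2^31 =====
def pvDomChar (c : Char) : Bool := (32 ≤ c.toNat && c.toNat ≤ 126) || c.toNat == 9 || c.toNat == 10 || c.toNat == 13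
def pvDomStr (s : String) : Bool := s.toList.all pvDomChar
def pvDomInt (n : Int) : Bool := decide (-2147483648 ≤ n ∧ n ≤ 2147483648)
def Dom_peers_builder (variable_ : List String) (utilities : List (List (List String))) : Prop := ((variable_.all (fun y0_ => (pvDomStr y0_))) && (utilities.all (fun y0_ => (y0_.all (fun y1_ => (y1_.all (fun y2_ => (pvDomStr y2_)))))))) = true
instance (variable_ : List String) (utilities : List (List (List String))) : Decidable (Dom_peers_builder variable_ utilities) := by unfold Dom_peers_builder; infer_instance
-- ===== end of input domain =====

-- B replaces A's per-variable rescan of all units by a single pass over the units that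
-- appends each unit to the lists of the variables it contains, via a dict built once.

-- ===== PORT A =====
def peers_builder (variable_ : List String) (utilities : List (List (List String))) : List (String × List (List String)) :=
  (variable_.foldl
    (fun peers v =>
      let up := utilities.foldl
        (fun up l =>
          l.foldl (fun up n => if n.contains v then up ++ [n] else up) up)
        []
      peers.insert v up)
    (PySem.Dict.empty : PySem.Dict String (List (List String)))).items

-- ===== PORT B =====
def peers_builder_alt (variable_ : List String) (utilities : List (List (List String))) : List (String × List (List String)) :=
  (utilities.foldl
    (fun d group =>
      group.foldl
        (fun d unit =>
          (PySem.List.dedup unit).foldl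
            (fun d v => if d.contains v then d.modify v [] (fun l => l ++ [unit]) else d)
            d)
        d)
    (variable_.foldl (fun d v => d.insert v [])
      (PySem.Dict.empty : PySem.Dict String (List (List String))))).items

-- ===== PRECONDITION & SPEC =====
def Spec_peers_builder (variable_ : List String) (utilities : List (List (List String))) (out : List (String × List (List String))) : Prop := out = peers_builder_alt variable_ utilities
instance (variable_ : List String) (utilities : List (List (List String))) (out : List (String × List (List String))) : Decidable (Spec_peers_builder variable_ utilities out) := by unfold Spec_peers_builder; infer_instance

-- ===== CLAIM (what is proved, stated in full; the proofs are below) =====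
def Claim_equal_peers_builder : Prop := ∀ (variable_ : List String) (utilities : List (List (List String))), Dom_peers_builder variable_ utilities → Spec_peers_builder variable_ utilities (peers_builder variable_ utilities)

-- ===== LEMMAS AND PROOFS =====

-- a dict whose value at each (distinct) key k of K is g k
def dictOf (K : List String) (g : String → List (List String)) : PySem.Dict String (List (List String)) :=
  ⟨K.map (fun v => (v, g v))⟩

-- the common target value: all units (in traversal order) containing v
def unitsOf (utilities : List (List (List String))) (v : String) : List (List String) :=
  utilities.flatMap (fun l => l.filter (fun u => u.contains v))

lemma dictOf_congr (K : List String) (g g' : String → List (List String))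
    (h : ∀ v ∈ K, g v = g' v) : dictOf K g = dictOf K g' := by
  unfold dictOf
  exact congrArg PySem.Dict.mk (List.map_congr_left (fun v hv => by rw [h v hv]))

lemma contains_dictOf (K : List String) (g : String → List (List String)) (v : String) :
    (dictOf K g).contains v = decide (v ∈ K) := by
  induction K with
  | nil => simp [dictOf, PySem.Dict.contains]
  | cons k K ih =>
    simp [dictOf, PySem.Dict.contains] at ih ⊢
    by_cases h : k = v
    · simp [h]
    · have h' : ¬ v = k := fun hh => h hh.symm
      simp [h, h', ih]

lemma keys_dictOf (K : List String) (g : String → List (List String)) :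
    (dictOf K g).keys = K := by
  simp [dictOf, PySem.Dict.keys_mk, Function.comp_def]

lemma getD_dictOf (K : List String) (hK : K.Nodup) (g : String → List (List String))
    (v : String) (hv : v ∈ K) (d0 : List (List String)) :
    (dictOf K g).getD v d0 = g v := by
  apply PySem.Dict.getD_of_mem_items
  · exact List.mem_map_of_mem hv
  · rw [keys_dictOf]; exact hK

lemma insert_dictOf (K : List String) (g : String → List (List String))
    (v : String) (w : List (List String)) :
    (dictOf K g).insert v w
      = dictOf (PySem.Set.add K v) (fun k => if k = v then w else g k) := by
  by_cases hv : v ∈ K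
  · have hc : (dictOf K g).contains v = true := by
      rw [contains_dictOf]; exact decide_eq_true hv
    have hs : PySem.Set.add K v = K := by
      simp [PySem.Set.add, PySem.Set.contains, hv]
    apply PySem.Dict.ext
    rw [PySem.Dict.items_insert_of_contains _ _ hc, hs]
    show _ = (dictOf K _).items
    unfold dictOf
    simp only [List.map_map]
    apply List.map_congr_left
    intro k _
    by_cases hk : k = v <;> simp [hk]
  · have hc : (dictOf K g).contains v = false := by
      rw [contains_dictOf]; exact decide_eq_false hv
    have hs : PySem.Set.add K v = K ++ [v] := by
      simp [PySem.Set.add, PySem.Set.contains, hv]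
    apply PySem.Dict.ext
    rw [PySem.Dict.items_insert_of_not_contains _ _ hc, hs]
    unfold dictOf
    simp only [List.map_append, List.map_cons, List.map_nil]
    congr 1
    apply List.map_congr_left
    intro k hk
    have : k ≠ v := fun h => hv (h ▸ hk)
    simp [this]

lemma nodup_set_add (K : List String) (hK : K.Nodup) (v : String) :
    (PySem.Set.add K v).Nodup := by
  by_cases hv : v ∈ K <;> simp [PySem.Set.add, PySem.Set.contains, hv, hK, List.nodup_append]
  intro a ha h
  exact hv (h ▸ ha)

-- A's outer loop: repeated insert of (v, f v) builds the ordered-dedup map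
lemma foldl_insert_fn (f : String → List (List String)) :
    ∀ (xs K : List String), K.Nodup →
      xs.foldl (fun d v => d.insert v (f v)) (dictOf K f)
        = dictOf (PySem.Set.update K xs) f := by
  intro xs
  induction xs with
  | nil => intro K _; rfl
  | cons x xs ih =>
    intro K hK
    have h1 : (dictOf K f).insert x (f x) = dictOf (PySem.Set.add K x) f := by
      rw [insert_dictOf K f x (f x)]
      apply dictOf_congr
      intro v _
      by_cases hv : v = x <;> simp [hv]
    simp only [List.foldl_cons, h1]
    rw [ih (PySem.Set.add K x) (nodup_set_add K hK x)]
    rfl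

-- A's inner double loop computes unitsOf
lemma inner_eq (utilities : List (List (List String))) (v : String) :
    utilities.foldl
      (fun up l => l.foldl (fun up n => if n.contains v then up ++ [n] else up) up) []
      = unitsOf utilities v := by
  rw [PySem.List.foldl_congr_mem _ _
    (fun up l => up ++ l.filter (fun u => u.contains v)) _
    (fun acc l _ => PySem.List.foldl_append_if_eq_filter _ l acc)]
  rw [PySem.List.foldl_append_eq_flatMap]
  simp [unitsOf]

-- B's pass over one unit's distinct members appends the unit to each contained key's list
lemma dedup_pass (K : List String) (hK : K.Nodup) (u : List String) :
    ∀ (L : List String), L.Nodup → ∀ (g : String → List (List String)),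
      L.foldl (fun d v => if d.contains v then d.modify v [] (fun l => l ++ [u]) else d)
          (dictOf K g)
        = dictOf K (fun v => if v ∈ L then g v ++ [u] else g v) := by
  intro L
  induction L with
  | nil =>
    intro _ g
    simp
  | cons v0 L ihL =>
    intro hnd g
    have hv0L : v0 ∉ L := (List.nodup_cons.mp hnd).1
    have hndL : L.Nodup := (List.nodup_cons.mp hnd).2
    simp only [List.foldl_cons]
    by_cases hv : v0 ∈ K
    · have hc : (dictOf K g).contains v0 = true := by
        rw [contains_dictOf]; exact decide_eq_true hv
      have hstep : (dictOf K g).modify v0 [] (fun l => l ++ [u])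
          = dictOf K (fun v => if v = v0 then g v0 ++ [u] else g v) := by
        unfold PySem.Dict.modify
        rw [getD_dictOf K hK g v0 hv, insert_dictOf K g v0 (g v0 ++ [u])]
        have hs : PySem.Set.add K v0 = K := by
          simp [PySem.Set.add, PySem.Set.contains, hv]
        rw [hs]
      rw [hc, if_pos rfl, hstep, ihL hndL]
      apply dictOf_congr
      intro k _
      by_cases hk : k = v0
      · subst hk
        simp [hv0L]
      · simp [hk]
    · have hc : (dictOf K g).contains v0 = false := by
        rw [contains_dictOf]; exact decide_eq_false hv
      rw [hc]
      simp only [Bool.false_eq_true, ite_false]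
      rw [ihL hndL]
      apply dictOf_congr
      intro k hkK
      have : k ≠ v0 := fun h => hv (h ▸ hkK)
      simp [this]

-- B's loop over one group of units
lemma group_pass (K : List String) (hK : K.Nodup) :
    ∀ (units : List (List String)) (g : String → List (List String)),
      units.foldl
        (fun d unit =>
          (PySem.List.dedup unit).foldl
            (fun d v => if d.contains v then d.modify v [] (fun l => l ++ [unit]) else d) d)
        (dictOf K g)
      = dictOf K (fun v => g v ++ units.filter (fun u => u.contains v)) := by
  intro units
  induction units with
  | nil =>
    intro g
    simp
  | cons u units ih =>
    intro g
    simp only [List.foldl_cons]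
    rw [dedup_pass K hK u (PySem.List.dedup u) (PySem.List.nodup_dedup u) g, ih]
    apply dictOf_congr
    intro v _
    by_cases hv : v ∈ u <;> simp [hv]

-- B's full pass over all groups
lemma groups_pass (K : List String) (hK : K.Nodup) :
    ∀ (gs : List (List (List String))) (g : String → List (List String)),
      gs.foldl
        (fun d group =>
          group.foldl
            (fun d unit =>
              (PySem.List.dedup unit).foldl
                (fun d v => if d.contains v then d.modify v [] (fun l => l ++ [unit]) else d) d)
            d)
        (dictOf K g)
      = dictOf K (fun v => g v ++ unitsOf gs v) := by
  intro gs
  induction gs with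
  | nil =>
    intro g
    simp [unitsOf]
  | cons grp gs ih =>
    intro g
    simp only [List.foldl_cons]
    rw [group_pass K hK grp g, ih]
    apply dictOf_congr
    intro v _
    simp [unitsOf, List.append_assoc]

lemma nodup_ofList' (xs : List String) : (PySem.Set.ofList xs : List String).Nodup := by
  rw [← PySem.List.dedup_eq_ofList]
  exact PySem.List.nodup_dedup xs

-- ===== VERDICT (by name: the statement is the Claim_ definition above) =====
theorem peers_builder_spec : Claim_equal_peers_builder := by
  intro variable_ utilities _
  unfold Spec_peers_builder peers_builder peers_builder_alt
  have hA : variable_.foldl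
      (fun peers v =>
        let up := utilities.foldl
          (fun up l => l.foldl (fun up n => if n.contains v then up ++ [n] else up) up) []
        peers.insert v up)
      (PySem.Dict.empty : PySem.Dict String (List (List String)))
      = dictOf (PySem.Set.ofList variable_) (fun v => unitsOf utilities v) := by
    rw [PySem.List.foldl_congr_mem _ _
      (fun d v => d.insert v (unitsOf utilities v)) _
      (fun acc v _ => by simp only [inner_eq utilities v])]
    rw [show (PySem.Dict.empty : PySem.Dict String (List (List String)))
        = dictOf [] (fun v => unitsOf utilities v) from rfl]
    rw [foldl_insert_fn (fun v => unitsOf utilities v) variable_ [] List.nodup_nil]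
    rfl
  have hinit : variable_.foldl (fun d v => d.insert v [])
      (PySem.Dict.empty : PySem.Dict String (List (List String)))
      = dictOf (PySem.Set.ofList variable_) (fun _ => []) := by
    rw [show (PySem.Dict.empty : PySem.Dict String (List (List String)))
        = dictOf [] (fun _ => []) from rfl]
    rw [foldl_insert_fn (fun _ => []) variable_ [] List.nodup_nil]
    rfl
  rw [hA, hinit, groups_pass (PySem.Set.ofList variable_) (nodup_ofList' variable_)]
  apply congrArg PySem.Dict.items
  apply dictOf_congr
  intro v _
  simp
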